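-- pv_equiv track=rewrite | github.com/benjaminzeman/ofitec.ai | backend/tests/test_ar_rules_new_metrics.py | streak_dir
-- ===== SOURCE A (Python) =====
-- def streak_dir(values):
--     if len(values) < 2:
--         return 0
--     direction = 0
--     for i in range(len(values) - 1, 0, -1):
--         cur = values[i]
--         prev = values[i - 1]
--         if cur > prev:
--             if direction in (0, 1):
--                 direction = 1
--             else:
--                 break
--         elif cur < prev:
--             if direction in (0, -1):
--                 direction = -1
--             else:
--                 break
--         else:
--             break
--     return direction
-- ===== SOURCE B (Python) =====
-- def streak_dir(values):
--     # The trailing-streak direction is fixed by its first comparison: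
--     # it is just the sign of the last difference.
--     if len(values) < 2:
--         return 0
--     d = values[-1] - values[-2]
--     return (d > 0) - (d < 0)
-- ===== Notes on version B (the rewrite author's own statement) =====
-- stated objective: simpler
-- what changed: A scans backwards through the whole trailing monotonic run even though its result is fixed by its first comparison; B just returns the sign of the last difference (last element minus the one before it), with no loop.
import Mathlib
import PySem

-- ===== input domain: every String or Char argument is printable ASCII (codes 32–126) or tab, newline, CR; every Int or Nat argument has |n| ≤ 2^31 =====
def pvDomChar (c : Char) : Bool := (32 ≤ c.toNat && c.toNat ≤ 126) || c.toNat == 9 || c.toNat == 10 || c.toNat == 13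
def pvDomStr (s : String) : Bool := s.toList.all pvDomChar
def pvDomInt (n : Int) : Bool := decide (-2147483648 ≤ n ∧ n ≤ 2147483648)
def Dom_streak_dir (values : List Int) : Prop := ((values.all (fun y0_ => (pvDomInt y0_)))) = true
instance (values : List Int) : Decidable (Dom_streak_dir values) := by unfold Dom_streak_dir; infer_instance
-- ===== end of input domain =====

-- B replaces A's backward scan of the trailing monotonic run by the sign of the last
-- difference (last element minus the one before it), which already determines A's result (simpler: no loop).

-- ===== PORT A =====
-- the loop 'for i in range(len(values)-1, 0, -1): … break …', with 'break' returning
-- the current direction; indices i and i-1 are always in range here, so pyGetD _ _ 0 is exact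
def streakLoop (values : List Int) (idxs : List Int) (direction : Int) : Int :=
  match idxs with
  | [] => direction
  | i :: rest =>
    let cur := PySem.List.pyGetD values i 0
    let prev := PySem.List.pyGetD values (i - 1) 0
    if cur > prev then
      if direction = 0 ∨ direction = 1 then streakLoop values rest 1
      else direction
    else if cur < prev then
      if direction = 0 ∨ direction = -1 then streakLoop values rest (-1)
      else direction
    else direction

def streak_dir (values : List Int) : Int :=
  if values.length < 2 then 0
  else streakLoop values (PySem.List.pyRange ((values.length : Int) - 1) 0 (-1)) 0

-- ===== PORT B =====
def streak_dir_alt (values : List Int) : Int :=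
  if values.length < 2 then 0
  else
    let d := (PySem.List.pyGetD values (-1) 0) - (PySem.List.pyGetD values (-2) 0)
    (if d > 0 then (1 : Int) else 0) - (if d < 0 then (1 : Int) else 0)

-- ===== PRECONDITION & SPEC =====
def Spec_streak_dir (values : List Int) (out : Int) : Prop := out = streak_dir_alt values
instance (values : List Int) (out : Int) : Decidable (Spec_streak_dir values out) := by unfold Spec_streak_dir; infer_instance

-- ===== CLAIM (what is proved, stated in full; the proofs are below) =====
def Claim_equal_streak_dir : Prop := ∀ (values : List Int), Dom_streak_dir values → Spec_streak_dir values (streak_dir values)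

-- ===== LEMMAS AND PROOFS =====

-- once the direction is set to 1 (resp. -1) the loop can only keep it or break with it
theorem streakLoop_one (values idxs : List Int) : streakLoop values idxs 1 = 1 := by
  induction idxs with
  | nil => rfl
  | cons i rest ih =>
    simp only [streakLoop]
    split_ifs <;> simp_all

theorem streakLoop_neg_one (values idxs : List Int) : streakLoop values idxs (-1) = -1 := by
  induction idxs with
  | nil => rfl
  | cons i rest ih =>
    simp only [streakLoop]
    split_ifs <;> simp_all

-- the descending range from a positive a starts with a
theorem pyRange_down_cons (a : Int) (ha : 0 < a) :
    ∃ rest, PySem.List.pyRange a 0 (-1) = a :: rest := by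
  obtain ⟨m, hm⟩ : ∃ m, ((a - 0 + -(-1:Int) - 1) / -(-1:Int)).toNat = m + 1 :=
    ⟨a.toNat - 1, by simp; omega⟩
  refine ⟨(List.range m).map (fun k : Nat => a + -1 * ((k : Int) + 1)), ?_⟩
  unfold PySem.List.pyRange
  rw [if_neg (by norm_num : ¬((-1:Int) = 0)), if_neg (by norm_num : ¬((0:Int) < -1)),
      if_pos (by omega : (0:Int) < a), hm]
  show List.map (fun k : Nat => a + -1 * (k : Int)) (List.range (m + 1)) = _
  rw [List.range_succ_eq_map, List.map_cons]
  simp [List.map_map, Function.comp_def]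

-- ===== VERDICT (by name: the statement is the Claim_ definition above) =====
theorem streak_dir_spec : Claim_equal_streak_dir := by
  intro values _
  unfold Spec_streak_dir streak_dir streak_dir_alt
  by_cases h : values.length < 2
  · simp [h]
  · rw [if_neg h, if_neg h]
    rw [Nat.not_lt] at h
    obtain ⟨rest, hr⟩ := pyRange_down_cons ((values.length : Int) - 1) (by omega)
    rw [hr]
    have hcur : PySem.List.pyGetD values ((values.length : Int) - 1) 0
        = values[values.length - 1]'(by omega) := by
      rw [PySem.List.pyGetD_eq_getElem values 0 (by omega) (by omega)]
      congr 1
      omega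
    have hprev : PySem.List.pyGetD values ((values.length : Int) - 1 - 1) 0
        = values[values.length - 2]'(by omega) := by
      rw [PySem.List.pyGetD_eq_getElem values 0 (by omega) (by omega)]
      congr 1
      omega
    have hb1 : PySem.List.pyGetD values (-1) 0 = values[values.length - 1]'(by omega) := by
      rw [PySem.List.pyGetD_neg_ofNat values 1 0 (by omega) (by omega)]
    have hb2 : PySem.List.pyGetD values (-2) 0 = values[values.length - 2]'(by omega) := by
      rw [PySem.List.pyGetD_neg_ofNat values 2 0 (by omega) (by omega)]
    simp only [streakLoop, hcur, hprev, hb1, hb2]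
    set c := values[values.length - 1]'(by omega)
    set p := values[values.length - 2]'(by omega)
    split_ifs with h1 h2 h3 h4 h5 h6 h7 <;>
      first
        | (rw [streakLoop_one values rest]; omega)
        | (rw [streakLoop_neg_one values rest]; omega)
        | omega
        | simp_all
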